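-- pv_equiv track=rewrite | github.com/jakimhartford/revgen-work-tracker | scripts/sync_issue_to_notion.py | map_status_to_notion
-- ===== SOURCE A (Python) =====
-- def map_status_to_notion(issue_state: str, labels: list = None) -> str:
--     """Map GitHub issue state + labels to Notion Status."""
--     if issue_state == "closed":
--         return "Done"
--
--     if labels:
--         label_names = [l["name"].lower() for l in labels]
--         if "blocked" in label_names:
--             return "Blocked"
--         if "in-progress" in label_names or "in progress" in label_names:
--             return "In Progress"
--         if "review" in label_names or "under-review" in label_names:
--             return "Under Review"
--
--     return "Backlog"
-- ===== SOURCE B (Python) =====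
-- _TABLE = {
--     "blocked": (0, "Blocked"),
--     "in-progress": (1, "In Progress"),
--     "in progress": (1, "In Progress"),
--     "review": (2, "Under Review"),
--     "under-review": (2, "Under Review"),
-- }
--
--
-- def map_status_to_notion(issue_state: str, labels: list = None) -> str:
--     """Map GitHub issue state + labels to Notion Status."""
--     if issue_state == "closed":
--         return "Done"
--     best = None
--     if labels:
--         for l in labels:
--             hit = _TABLE.get(l["name"].lower())
--             if hit is not None and (best is None or hit[0] < best[0]):
--                 best = hit
--     return best[1] if best is not None else "Backlog"
-- ===== Notes on version B (the rewrite author's own statement) =====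
-- stated objective: idiomatic
-- what changed: Replaces the three membership scans over a prebuilt lowered-name list with a priority table (label -> (priority, status)) and a single pass over the labels tracking the minimum-priority hit.
import Mathlib
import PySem

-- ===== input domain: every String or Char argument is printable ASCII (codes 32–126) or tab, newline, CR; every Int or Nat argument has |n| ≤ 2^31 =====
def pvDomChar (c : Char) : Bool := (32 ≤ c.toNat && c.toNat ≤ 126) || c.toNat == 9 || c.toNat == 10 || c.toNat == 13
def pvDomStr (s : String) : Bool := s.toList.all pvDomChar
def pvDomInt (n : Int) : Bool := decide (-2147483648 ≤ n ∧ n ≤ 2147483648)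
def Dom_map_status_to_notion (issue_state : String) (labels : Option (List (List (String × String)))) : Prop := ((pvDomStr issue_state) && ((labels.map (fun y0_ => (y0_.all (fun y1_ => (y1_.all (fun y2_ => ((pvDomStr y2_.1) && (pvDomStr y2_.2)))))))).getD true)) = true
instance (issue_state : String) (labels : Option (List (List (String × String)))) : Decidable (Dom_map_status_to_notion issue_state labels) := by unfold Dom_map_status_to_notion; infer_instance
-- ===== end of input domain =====

-- B replaces A's three membership scans over a prebuilt lowered-name list with a
-- priority table and one pass over the labels tracking the minimum-priority hit (idiomatic).

-- ===== PORT A =====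
-- l["name"].lower() for a label dict l (first-match association-list lookup;
-- the .getD "" default is never reached under Pre_, which requires the key)
def pvName (l : List (String × String)) : String :=
  PySem.Str.lower (((PySem.Dict.mk l).get? "name").getD "")

def map_status_to_notion (issue_state : String) (labels : Option (List (List (String × String)))) : String :=
  if issue_state == "closed" then "Done"
  else
    match labels with
    | some ls =>
      if !ls.isEmpty then
        let label_names := ls.map pvName
        if label_names.contains "blocked" then "Blocked"
        else if label_names.contains "in-progress" || label_names.contains "in progress" then "In Progress"
        else if label_names.contains "review" || label_names.contains "under-review" then "Under Review"
        else "Backlog"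
      else "Backlog"
    | none => "Backlog"

-- ===== PORT B =====
def pvTable : PySem.Dict String (Int × String) :=
  PySem.Dict.ofList [("blocked", (0, "Blocked")), ("in-progress", (1, "In Progress")),
    ("in progress", (1, "In Progress")), ("review", (2, "Under Review")),
    ("under-review", (2, "Under Review"))]

def map_status_to_notion_alt (issue_state : String) (labels : Option (List (List (String × String)))) : String :=
  if issue_state == "closed" then "Done"
  else
    let best : Option (Int × String) :=
      match labels with
      | some ls =>
        if !ls.isEmpty then
          ls.foldl (fun best l =>
            match pvTable.get? (pvName l) with
            | none => best
            | some h =>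
              match best with
              | none => some h
              | some b => if h.1 < b.1 then some h else some b) none
        else none
      | none => none
    match best with
    | some b => b.2
    | none => "Backlog"

-- ===== PRECONDITION & SPEC =====
-- Pre_ excludes only inputs on which both Pythons raise KeyError: issue_state other
-- than closed together with a label dict missing its name field.
def Pre_map_status_to_notion (issue_state : String) (labels : Option (List (List (String × String)))) : Prop :=
  issue_state ≠ "closed" → ∀ ls, labels = some ls → ∀ l ∈ ls, ((PySem.Dict.mk l).get? "name").isSome
instance (issue_state : String) (labels : Option (List (List (String × String)))) : Decidable (Pre_map_status_to_notion issue_state labels) := by unfold Pre_map_status_to_notion; infer_instance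

def pvWitness_map_status_to_notion : String × (Option (List (List (String × String)))) :=
  ("open", some [[("name", "Blocked")], [("name", "review")]])

def Spec_map_status_to_notion (issue_state : String) (labels : Option (List (List (String × String)))) (out : String) : Prop := out = map_status_to_notion_alt issue_state labels
instance (issue_state : String) (labels : Option (List (List (String × String)))) (out : String) : Decidable (Spec_map_status_to_notion issue_state labels out) := by unfold Spec_map_status_to_notion; infer_instance

-- ===== CLAIM (what is proved, stated in full; the proofs are below) =====
def Claim_equal_map_status_to_notion : Prop := ∀ (issue_state : String) (labels : Option (List (List (String × String)))), Dom_map_status_to_notion issue_state labels → Pre_map_status_to_notion issue_state labels → Spec_map_status_to_notion issue_state labels (map_status_to_notion issue_state labels)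

-- ===== LEMMAS AND PROOFS =====

-- one step of B's loop as a binary merge on the accumulator
def pvMerge (a b : Option (Int × String)) : Option (Int × String) :=
  match a, b with
  | none, b => b
  | some a, none => some a
  | some a, some h => if h.1 < a.1 then some h else some a

def pvStep (best : Option (Int × String)) (s : String) : Option (Int × String) :=
  match pvTable.get? s with
  | none => best
  | some h =>
    match best with
    | none => some h
    | some b => if h.1 < b.1 then some h else some b

-- the canonical value of B's fold over a list of (lowered) names
def pvCanon (names : List String) : Option (Int × String) :=
  if names.contains "blocked" then some (0, "Blocked")
  else if names.contains "in-progress" || names.contains "in progress" then some (1, "In Progress")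
  else if names.contains "review" || names.contains "under-review" then some (2, "Under Review")
  else none

lemma pvTable_eq_mk : pvTable = PySem.Dict.mk
    [("blocked", (0, "Blocked")), ("in-progress", (1, "In Progress")),
     ("in progress", (1, "In Progress")), ("review", (2, "Under Review")),
     ("under-review", (2, "Under Review"))] := by decide

lemma pvTable_get? (s : String) : pvTable.get? s =
    if s = "blocked" then some (0, "Blocked")
    else if s = "in-progress" then some (1, "In Progress")
    else if s = "in progress" then some (1, "In Progress")
    else if s = "review" then some (2, "Under Review")
    else if s = "under-review" then some (2, "Under Review")
    else none := by
  rw [pvTable_eq_mk]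
  by_cases h1 : s = "blocked"
  · subst h1; decide
  by_cases h2 : s = "in-progress"
  · subst h2; decide
  by_cases h3 : s = "in progress"
  · subst h3; decide
  by_cases h4 : s = "review"
  · subst h4; decide
  by_cases h5 : s = "under-review"
  · subst h5; decide
  simp [PySem.Dict.get?, h1, h2, h3, h4, h5,
    Ne.symm h1, Ne.symm h2, Ne.symm h3, Ne.symm h4, Ne.symm h5]

lemma pvStep_eq_merge (best : Option (Int × String)) (s : String) :
    pvStep best s = pvMerge best (pvTable.get? s) := by
  unfold pvStep pvMerge
  cases pvTable.get? s <;> cases best <;> rfl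

-- appending one more name merges its table hit into the canonical value
lemma pvCanon_append (names : List String) (s : String) :
    pvMerge (pvCanon names) (pvTable.get? s) = pvCanon (names ++ [s]) := by
  rw [pvTable_get?]
  by_cases h1 : s = "blocked"
  · subst h1
    simp only [pvCanon, List.contains_append, List.contains_cons]
    split_ifs <;> simp_all [pvMerge]
  by_cases h2 : s = "in-progress"
  · subst h2
    simp only [pvCanon, List.contains_append, List.contains_cons]
    split_ifs <;> simp_all [pvMerge]
  by_cases h3 : s = "in progress"
  · subst h3
    simp only [pvCanon, List.contains_append, List.contains_cons]
    split_ifs <;> simp_all [pvMerge]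
  by_cases h4 : s = "review"
  · subst h4
    simp only [pvCanon, List.contains_append, List.contains_cons]
    split_ifs <;> simp_all [pvMerge]
  by_cases h5 : s = "under-review"
  · subst h5
    simp only [pvCanon, List.contains_append, List.contains_cons]
    split_ifs <;> simp_all [pvMerge]
  simp only [pvCanon, List.contains_append, List.contains_cons, List.contains_nil]
  split_ifs <;>
    simp_all [pvMerge, Ne.symm h1, Ne.symm h2, Ne.symm h3, Ne.symm h4, Ne.symm h5]

-- B's fold over the lowered names computes the canonical value
lemma pvFoldl_step (names : List String) :
    names.foldl pvStep none = pvCanon names := by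
  induction names using List.reverseRecOn with
  | nil => simp [pvCanon]
  | append_singleton ns s ih =>
    rw [List.foldl_append, List.foldl_cons, List.foldl_nil, ih, pvStep_eq_merge,
      pvCanon_append]

-- ===== VERDICT (by name: the statement is the Claim_ definition above) =====
theorem map_status_to_notion_spec : Claim_equal_map_status_to_notion := by
  intro issue_state labels _ _
  unfold Spec_map_status_to_notion map_status_to_notion map_status_to_notion_alt
  by_cases hc : issue_state == "closed"
  · simp [hc]
  · simp only [hc, if_false, Bool.false_eq_true]
    cases labels with
    | none => rfl
    | some ls =>
      by_cases he : ls.isEmpty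
      · simp [he]
      · simp only [he, Bool.not_false, if_true]
        have hfold : ls.foldl (fun best l =>
            match pvTable.get? (pvName l) with
            | none => best
            | some h =>
              match best with
              | none => some h
              | some b => if h.1 < b.1 then some h else some b) none
            = pvCanon (ls.map pvName) := by
          have hmap : ls.foldl (fun best l => pvStep best (pvName l)) none
              = (ls.map pvName).foldl pvStep none := by rw [List.foldl_map]
          rw [show (fun (best : Option (Int × String)) l =>
              match pvTable.get? (pvName l) with
              | none => best
              | some h =>
                match best with
                | none => some h
                | some b => if h.1 < b.1 then some h else some b)
              = (fun best l => pvStep best (pvName l)) from rfl,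
            hmap, pvFoldl_step]
        rw [hfold]
        unfold pvCanon
        split_ifs <;> simp_all
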